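-- pv_equiv track=rewrite | github.com/Tradouf/Scalper-V6 | agents/regime_engine.py | _compute_state_age
-- ===== SOURCE A (Python) =====
-- from typing import Deque, Dict, List, Optional, Tuple
--
-- def _compute_state_age(states: List[str]) -> int:
--     if not states:
--         return 0
--     current = states[-1]
--     age = 0
--     for s in reversed(states):
--         if s == current:
--             age += 1
--         else:
--             break
--     return age
-- ===== SOURCE B (Python) =====
-- def _compute_state_age(states):
--     run = 0
--     prev = None
--     for s in states:
--         run = run + 1 if prev is not None and s == prev else 1
--         prev = s
--     return run
-- ===== Notes on version B (the rewrite author's own statement) =====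
-- stated objective: alternative
-- what changed: Replaces the backward suffix scan with early break by a single forward pass maintaining a resettable run counter and previous-element marker.
import Mathlib
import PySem

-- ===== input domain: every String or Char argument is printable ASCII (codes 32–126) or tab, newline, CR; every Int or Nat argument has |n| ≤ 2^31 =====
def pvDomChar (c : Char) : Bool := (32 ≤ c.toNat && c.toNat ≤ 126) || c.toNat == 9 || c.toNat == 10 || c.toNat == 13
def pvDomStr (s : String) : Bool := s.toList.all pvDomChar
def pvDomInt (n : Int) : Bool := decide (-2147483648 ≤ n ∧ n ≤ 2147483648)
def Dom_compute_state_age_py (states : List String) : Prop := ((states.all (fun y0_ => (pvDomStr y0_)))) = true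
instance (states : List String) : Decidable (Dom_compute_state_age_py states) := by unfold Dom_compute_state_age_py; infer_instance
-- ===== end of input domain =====

-- ===== PORT A =====
-- Header: A scans the reversed list counting while elements equal the last one, breaking at
-- the first mismatch; B is a single forward pass with a resettable run counter (alternative decomposition).
-- for-loop with break over reversed(states): count prefix of the reversed list equal to `current`
def pvALoop (current : String) : List String → Int
  | [] => 0
  | s :: rest => if s == current then 1 + pvALoop current rest else 0

def compute_state_age_py (states : List String) : Int :=
  if states = [] then 0
  else
    let current := (PySem.List.pyGet? states (-1)).getD ""
    pvALoop current states.reverse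

-- ===== PORT B =====
-- forward pass: state (run, prev); run resets to 1 whenever s differs from prev (or prev is None)
def pvBStep (acc : Int × Option String) (s : String) : Int × Option String :=
  if acc.2 == some s then (acc.1 + 1, some s) else (1, some s)

def compute_state_age_py_alt (states : List String) : Int :=
  (states.foldl pvBStep (0, none)).1

-- ===== PRECONDITION & SPEC =====
def Spec_compute_state_age_py (states : List String) (out : Int) : Prop := out = compute_state_age_py_alt states
instance (states : List String) (out : Int) : Decidable (Spec_compute_state_age_py states out) := by unfold Spec_compute_state_age_py; infer_instance

-- ===== CLAIM (what is proved, stated in full; the proofs are below) =====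
def Claim_equal_compute_state_age_py : Prop := ∀ (states : List String), Dom_compute_state_age_py states → Spec_compute_state_age_py states (compute_state_age_py states)

-- ===== LEMMAS AND PROOFS =====

-- The forward fold over xs ++ [a] ends at (1 + trailing run of a in xs, some a).
theorem pvFold_append_singleton (xs : List String) (a : String) :
    List.foldl pvBStep (0, none) (xs ++ [a]) = (1 + pvALoop a xs.reverse, some a) := by
  induction xs using List.reverseRecOn generalizing a with
  | nil => simp [pvBStep, pvALoop]
  | append_singleton ys c ih =>
      rw [List.foldl_append, ih c]
      by_cases hca : c = a
      · subst hca
        simp [pvBStep, pvALoop, List.reverse_append]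
        ring
      · simp [pvBStep, pvALoop, List.reverse_append, hca]

-- ===== VERDICT (by name: the statement is the Claim_ definition above) =====
theorem compute_state_age_py_spec : Claim_equal_compute_state_age_py := by
  intro states _
  unfold Spec_compute_state_age_py compute_state_age_py compute_state_age_py_alt
  induction states using List.reverseRecOn with
  | nil => simp
  | append_singleton xs a _ =>
      have hne : xs ++ [a] ≠ [] := by simp
      rw [pvFold_append_singleton]
      simp only [if_neg hne, PySem.List.pyGet?_neg_one_append_singleton, Option.getD_some,
        List.reverse_append]
      simp [pvALoop]
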